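-- pv_equiv track=rewrite | github.com/Artyomka628/MorseZip | decoder.py | detransliterate
-- ===== SOURCE A (Python) =====
-- REVERSE_RU_TRANS = {
--     'ya': 'я', 'yu': 'ю', 'sch': 'щ', 'sh': 'ш', 'ch': 'ч', 'zh': 'ж',
--     'a': 'а', 'b': 'б', 'v': 'в', 'g': 'г', 'd': 'д', 'e': 'е', 'z': 'з',
--     'i': 'и', 'j': 'й', 'k': 'к', 'l': 'л', 'm': 'м', 'n': 'н', 'o': 'о',
--     'p': 'п', 'r': 'р', 's': 'с', 't': 'т', 'u': 'у', 'f': 'ф', 'h': 'х',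
--     'c': 'ц', 'y': 'ы'
-- }
--
-- REVERSE_RU_KEYS = sorted(REVERSE_RU_TRANS.keys(), key=lambda x: -len(x))
--
-- def detransliterate(text):
--     i = 0
--     result = ''
--     while i < len(text):
--         for key in REVERSE_RU_KEYS:
--             if text[i:i+len(key)] == key:
--                 result += REVERSE_RU_TRANS[key]
--                 i += len(key)
--                 break
--         else:
--             result += text[i]
--             i += 1
--     return result
-- ===== SOURCE B (Python) =====
-- REVERSE_RU_TRANS = {
--     'ya': 'я', 'yu': 'ю', 'sch': 'щ', 'sh': 'ш', 'ch': 'ч', 'zh': 'ж',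
--     'a': 'а', 'b': 'б', 'v': 'в', 'g': 'г', 'd': 'д', 'e': 'е', 'z': 'з',
--     'i': 'и', 'j': 'й', 'k': 'к', 'l': 'л', 'm': 'м', 'n': 'н', 'o': 'о',
--     'p': 'п', 'r': 'р', 's': 'с', 't': 'т', 'u': 'у', 'f': 'ф', 'h': 'х',
--     'c': 'ц', 'y': 'ы'
-- }
--
-- def detransliterate(text):
--     out = []
--     i = 0
--     n = len(text)
--     while i < n:
--         for L in (3, 2, 1):
--             chunk = text[i:i+L]
--             ru = REVERSE_RU_TRANS.get(chunk)
--             if ru is not None: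
--                 out.append(ru)
--                 i += len(chunk)
--                 break
--         else:
--             out.append(text[i])
--             i += 1
--     return ''.join(out)
-- ===== Notes on version B (the rewrite author's own statement) =====
-- stated objective: faster
-- what changed: A scans all 29 keys at every position (first prefix match in longest-first key order); B instead performs at most three O(1) dict lookups per position (the 3-, 2- and 1-character prefix), emitting into a list joined once instead of repeated string concatenation.
import Mathlib
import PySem

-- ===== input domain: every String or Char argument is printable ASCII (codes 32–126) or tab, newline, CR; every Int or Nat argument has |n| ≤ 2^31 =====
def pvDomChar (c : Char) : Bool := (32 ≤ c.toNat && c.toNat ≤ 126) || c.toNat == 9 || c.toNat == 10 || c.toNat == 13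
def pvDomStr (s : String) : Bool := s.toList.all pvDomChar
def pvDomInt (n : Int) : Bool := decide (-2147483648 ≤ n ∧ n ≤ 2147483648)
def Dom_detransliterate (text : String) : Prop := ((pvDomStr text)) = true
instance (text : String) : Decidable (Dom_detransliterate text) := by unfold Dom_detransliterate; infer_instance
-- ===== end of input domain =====

-- B replaces A's per-position scan over all 29 transliteration keys by at most three
-- dict lookups (prefix of length 3, then 2, then 1); same return value.
-- Strings are handled through List Char (String ↔ toList bridge); the keys/values of
-- the Python dict REVERSE_RU_TRANS appear as char-list literals.

-- ===== PORT A =====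
-- REVERSE_RU_TRANS (module-level constant shared by both programs), insertion order
def ruDict : PySem.Dict (List Char) (List Char) := PySem.Dict.ofList
  [(['y','a'],['я']), (['y','u'],['ю']), (['s','c','h'],['щ']), (['s','h'],['ш']), (['c','h'],['ч']), (['z','h'],['ж']), (['a'],['а']), (['b'],['б']), (['v'],['в']), (['g'],['г']), (['d'],['д']), (['e'],['е']), (['z'],['з']), (['i'],['и']), (['j'],['й']), (['k'],['к']), (['l'],['л']), (['m'],['м']), (['n'],['н']), (['o'],['о']), (['p'],['п']), (['r'],['р']), (['s'],['с']), (['t'],['т']), (['u'],['у']), (['f'],['ф']), (['h'],['х']), (['c'],['ц']), (['y'],['ы'])]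

-- REVERSE_RU_KEYS = sorted(keys, key=lambda x: -len(x))  (Python's stable sort, written out)
def ruKeys : List (List Char) :=
  [['s','c','h'], ['y','a'], ['y','u'], ['s','h'], ['c','h'], ['z','h'], ['a'], ['b'], ['v'], ['g'], ['d'], ['e'], ['z'], ['i'], ['j'], ['k'], ['l'], ['m'], ['n'], ['o'], ['p'], ['r'], ['s'], ['t'], ['u'], ['f'], ['h'], ['c'], ['y']]

-- A's inner for-loop: the first key with text[i:i+len(key)] == key
def scanA (ks : List (List Char)) (rem : List Char) : Option (List Char) :=
  match ks with
  | [] => none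
  | k :: tl => if rem.take k.length == k then some k else scanA tl rem

-- needed by goA's termination proof (cited in decreasing_by)
theorem scanA_mem {ks : List (List Char)} {rem k : List Char}
    (h : scanA ks rem = some k) : k ∈ ks := by
  induction ks with
  | nil => simp [scanA] at h
  | cons x tl ih =>
    simp only [scanA] at h
    split at h
    · simp_all
    · exact List.mem_cons_of_mem _ (ih h)

theorem ruKeys_pos : ∀ k ∈ ruKeys, 1 ≤ k.length := by decide

-- A's while-loop; the index i is represented by the remaining suffix of the text
def goA : List Char → List Char
  | [] => []
  | c :: rest =>
    match h : scanA ruKeys (c :: rest) with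
    | some k => ruDict.getD k [] ++ goA ((c :: rest).drop k.length)
    | none => c :: goA rest
  termination_by l => l.length
  decreasing_by
  · have hk := ruKeys_pos _ (scanA_mem h)
    simp [List.length_drop]; omega
  · simp

def detransliterate (text : String) : String := String.mk (goA text.toList)

-- ===== PORT B =====
-- B's inner for-loop: for L in (3, 2, 1): look up text[i:i+L] in the dict
def tryB (rem : List Char) : Option (List Char × Nat) :=
  match ruDict.get? (rem.take 3) with
  | some ru => some (ru, (rem.take 3).length)
  | none =>
    match ruDict.get? (rem.take 2) with
    | some ru => some (ru, (rem.take 2).length)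
    | none =>
      match ruDict.get? (rem.take 1) with
      | some ru => some (ru, (rem.take 1).length)
      | none => none

-- needed by goB's termination proof (cited in decreasing_by)
theorem tryB_pos {c : Char} {rest : List Char} {ru : List Char} {n : Nat}
    (h : tryB (c :: rest) = some (ru, n)) : 1 ≤ n := by
  simp only [tryB] at h
  split at h <;> [skip; split at h] <;> [skip; skip; split at h] <;>
    simp_all <;> omega

-- B's while-loop; i as the remaining suffix, advancing by len(chunk)
def goB : List Char → List Char
  | [] => []
  | c :: rest =>
    match h : tryB (c :: rest) with
    | some (ru, n) => ru ++ goB ((c :: rest).drop n)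
    | none => c :: goB rest
  termination_by l => l.length
  decreasing_by
  · have := tryB_pos h
    simp [List.length_drop]; omega
  · simp

def detransliterate_alt (text : String) : String := String.mk (goB text.toList)

-- ===== PRECONDITION & SPEC =====
def Spec_detransliterate (text : String) (out : String) : Prop := out = detransliterate_alt text
instance (text : String) (out : String) : Decidable (Spec_detransliterate text out) := by unfold Spec_detransliterate; infer_instance

-- ===== CLAIM (what is proved, stated in full; the proofs are below) =====
def Claim_equal_detransliterate : Prop := ∀ (text : String), Dom_detransliterate text → Spec_detransliterate text (detransliterate text)

-- ===== LEMMAS AND PROOFS =====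

-- the three length groups of ruKeys
def K3 : List (List Char) := [['s','c','h']]
def K2 : List (List Char) := [['y','a'], ['y','u'], ['s','h'], ['c','h'], ['z','h']]
def K1 : List (List Char) := [['a'], ['b'], ['v'], ['g'], ['d'], ['e'], ['z'], ['i'], ['j'], ['k'], ['l'], ['m'], ['n'], ['o'], ['p'], ['r'], ['s'], ['t'], ['u'], ['f'], ['h'], ['c'], ['y']]

theorem ruKeys_split : ruKeys = K3 ++ K2 ++ K1 := rfl

theorem scanA_append (ks₁ ks₂ rem) :
    scanA (ks₁ ++ ks₂) rem = (scanA ks₁ rem).orElse (fun _ => scanA ks₂ rem) := by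
  induction ks₁ with
  | nil => simp [scanA]
  | cons k tl ih => simp only [List.cons_append, scanA]; split <;> simp [ih]

-- on a group of keys that all see the same prefix q, A's scan is a membership test
theorem scanA_group {ks : List (List Char)} {rem q : List Char}
    (hq : ∀ k ∈ ks, rem.take k.length = q) :
    scanA ks rem = if q ∈ ks then some q else none := by
  induction ks with
  | nil => simp [scanA]
  | cons k tl ih =>
    have hk : rem.take k.length = q := hq k (by simp)
    have ih' := ih (fun k hk => hq k (List.mem_cons_of_mem _ hk))
    simp only [scanA, hk, beq_iff_eq, List.mem_cons]
    by_cases h : q = k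
    · simp [h]
    · have h' : ¬ (k = q) := fun hh => h hh.symm
      simp [h, ih']

theorem K3_len : ∀ k ∈ K3, k.length = 3 := by decide
theorem K2_len : ∀ k ∈ K2, k.length = 2 := by decide
theorem K1_len : ∀ k ∈ K1, k.length = 1 := by decide

theorem scanA_K3 (rem) : scanA K3 rem = if rem.take 3 ∈ K3 then some (rem.take 3) else none :=
  scanA_group (fun k hk => by rw [K3_len k hk])
theorem scanA_K2 (rem) : scanA K2 rem = if rem.take 2 ∈ K2 then some (rem.take 2) else none :=
  scanA_group (fun k hk => by rw [K2_len k hk])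
theorem scanA_K1 (rem) : scanA K1 rem = if rem.take 1 ∈ K1 then some (rem.take 1) else none :=
  scanA_group (fun k hk => by rw [K1_len k hk])

theorem ruDict_keys : ruDict.keys = [['y','a'], ['y','u'], ['s','c','h'], ['s','h'], ['c','h'], ['z','h'], ['a'], ['b'], ['v'], ['g'], ['d'], ['e'], ['z'], ['i'], ['j'], ['k'], ['l'], ['m'], ['n'], ['o'], ['p'], ['r'], ['s'], ['t'], ['u'], ['f'], ['h'], ['c'], ['y']] := by decide

set_option maxHeartbeats 1000000 in
theorem mem_keys_iff (q : List Char) : q ∈ ruDict.keys ↔ (q ∈ K3 ∨ q ∈ K2 ∨ q ∈ K1) := by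
  simp only [ruDict_keys, K3, K2, K1, List.mem_cons, List.not_mem_nil, or_false]
  tauto

-- B's dict lookup as a membership test returning getD
theorem get?_ruDict (q : List Char) :
    ruDict.get? q = if q ∈ ruDict.keys then some (ruDict.getD q []) else none := by
  rcases h : ruDict.get? q with _ | v
  · rw [if_neg ((PySem.Dict.get?_eq_none_iff_not_mem_keys ruDict q).mp h)]
  · rw [if_pos (PySem.Dict.mem_keys_of_mem_items _ (PySem.Dict.mem_items_of_get?_eq_some _ h)),
      PySem.Dict.getD_of_get?_eq_some ruDict [] h]

theorem len_not_mem {n : Nat} {ks : List (List Char)} {q : List Char}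
    (hlen : ∀ k ∈ ks, k.length = n) (h : q.length ≠ n) : q ∉ ks :=
  fun hm => h (hlen q hm)

-- the central step lemma: A's key scan (with its value and advance) is B's three lookups
theorem step_eq (rem : List Char) :
    (scanA ruKeys rem).map (fun k => (ruDict.getD k [], k.length)) = tryB rem := by
  rw [ruKeys_split, scanA_append, scanA_append, scanA_K3, scanA_K2, scanA_K1]
  match rem with
  | [] => decide
  | [c] =>
    have h3 : ([c] : List Char) ∉ K3 := len_not_mem K3_len (by simp)
    have h2 : ([c] : List Char) ∉ K2 := len_not_mem K2_len (by simp)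
    by_cases h1 : ([c] : List Char) ∈ K1
    · simp [tryB, get?_ruDict, mem_keys_iff, h1, h2, h3, Option.orElse]
    · simp [tryB, get?_ruDict, mem_keys_iff, h1, h2, h3, Option.orElse]
  | [c, d] =>
    have h3 : ([c, d] : List Char) ∉ K3 := len_not_mem K3_len (by simp)
    have h3' : ([c, d] : List Char) ∉ K1 := len_not_mem K1_len (by simp)
    have h1' : ([c] : List Char) ∉ K3 := len_not_mem K3_len (by simp)
    have h1'' : ([c] : List Char) ∉ K2 := len_not_mem K2_len (by simp)
    by_cases h2 : ([c, d] : List Char) ∈ K2 <;> by_cases h1 : ([c] : List Char) ∈ K1 <;>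
      simp [tryB, get?_ruDict, mem_keys_iff, h1, h2, h3, h3', h1', h1'', Option.orElse]
  | c :: d :: e :: t =>
    have a2 : ([c, d, e] : List Char) ∉ K2 := len_not_mem K2_len (by simp)
    have a1 : ([c, d, e] : List Char) ∉ K1 := len_not_mem K1_len (by simp)
    have b3 : ([c, d] : List Char) ∉ K3 := len_not_mem K3_len (by simp)
    have b1 : ([c, d] : List Char) ∉ K1 := len_not_mem K1_len (by simp)
    have c3 : ([c] : List Char) ∉ K3 := len_not_mem K3_len (by simp)
    have c2 : ([c] : List Char) ∉ K2 := len_not_mem K2_len (by simp)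
    by_cases h3 : ([c, d, e] : List Char) ∈ K3 <;>
      by_cases h2 : ([c, d] : List Char) ∈ K2 <;>
      by_cases h1 : ([c] : List Char) ∈ K1 <;>
      simp [tryB, get?_ruDict, mem_keys_iff, h1, h2, h3, a2, a1, b3, b1, c3, c2, Option.orElse]

theorem goA_cons_some {c : Char} {rest k : List Char}
    (hs : scanA ruKeys (c :: rest) = some k) :
    goA (c :: rest) = ruDict.getD k [] ++ goA ((c :: rest).drop k.length) := by
  rw [goA]; split <;> simp_all

theorem goA_cons_none {c : Char} {rest : List Char}
    (hs : scanA ruKeys (c :: rest) = none) :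
    goA (c :: rest) = c :: goA rest := by
  rw [goA]; split <;> simp_all

theorem goB_cons_some {c : Char} {rest ru : List Char} {n : Nat}
    (hs : tryB (c :: rest) = some (ru, n)) :
    goB (c :: rest) = ru ++ goB ((c :: rest).drop n) := by
  rw [goB]; split <;> simp_all

theorem goB_cons_none {c : Char} {rest : List Char}
    (hs : tryB (c :: rest) = none) :
    goB (c :: rest) = c :: goB rest := by
  rw [goB]; split <;> simp_all

theorem go_eq_aux : ∀ (n : Nat) (rem : List Char), rem.length ≤ n → goA rem = goB rem := by
  intro n
  induction n with
  | zero =>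
    intro rem h
    have : rem = [] := List.eq_nil_of_length_eq_zero (Nat.le_zero.mp h)
    simp [this, goA, goB]
  | succ n ih =>
    intro rem h
    match rem with
    | [] => simp [goA, goB]
    | c :: rest =>
      rcases hs : scanA ruKeys (c :: rest) with _ | k
      · have ht : tryB (c :: rest) = none := by rw [← step_eq]; simp [hs]
        rw [goA_cons_none hs, goB_cons_none ht]
        have : rest.length ≤ n := by simp at h; omega
        rw [ih rest this]
      · have ht : tryB (c :: rest) = some (ruDict.getD k [], k.length) := by
          rw [← step_eq, hs]; rfl
        rw [goA_cons_some hs, goB_cons_some ht]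
        have hk := ruKeys_pos _ (scanA_mem hs)
        have : ((c :: rest).drop k.length).length ≤ n := by
          simp [List.length_drop] at *; omega
        rw [ih _ this]

theorem goA_eq_goB (rem : List Char) : goA rem = goB rem :=
  go_eq_aux rem.length rem le_rfl

-- ===== VERDICT (by name: the statement is the Claim_ definition above) =====
theorem detransliterate_spec : Claim_equal_detransliterate := by
  intro text _
  unfold Spec_detransliterate detransliterate detransliterate_alt
  rw [goA_eq_goB]
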